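-- pv_equiv track=rewrite | github.com/frnovotny06/CVUT-Python | homework1/text.py | nejpismeno
-- ===== SOURCE A (Python) =====
-- def nejpismeno(text):
--
--     dictionary = {}
--
--     for i in text:
--         if i.isalpha():
--             if i not in dictionary:
--                 dictionary[i] = 0
--             dictionary[i] += 1
--     for i in dictionary:
--         pass
--     serazene = sorted(dictionary.items())
--
--     highest = 0
--     for k, v in serazene:
--         if v > highest:
--             highest = v
--
--     return highest * -1
-- ===== SOURCE B (Python) =====
-- def nejpismeno(text):
--     letters = sorted(c for c in text if c.isalpha())
--     best = 0
--     run = 0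
--     prev = None
--     for c in letters:
--         run = run + 1 if c == prev else 1
--         prev = c
--         if run > best:
--             best = run
--     return -best
-- ===== Notes on version B (the rewrite author's own statement) =====
-- stated objective: alternative
-- what changed: Replaces the dict-counter pass plus sorted-items max loop by sort-the-letters-then-scan-runs: the maximum run length in the sorted letter list is the maximum frequency, no dictionary at all.
import Mathlib
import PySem

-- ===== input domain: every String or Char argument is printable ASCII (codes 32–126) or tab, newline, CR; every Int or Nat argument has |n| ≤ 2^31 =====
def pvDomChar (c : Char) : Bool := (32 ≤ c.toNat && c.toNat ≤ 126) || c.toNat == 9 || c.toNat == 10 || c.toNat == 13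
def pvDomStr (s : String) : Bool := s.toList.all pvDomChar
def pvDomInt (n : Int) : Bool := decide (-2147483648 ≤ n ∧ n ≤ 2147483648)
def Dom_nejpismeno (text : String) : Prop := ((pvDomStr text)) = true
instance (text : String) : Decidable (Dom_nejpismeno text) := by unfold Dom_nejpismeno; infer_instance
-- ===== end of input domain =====

-- B replaces A's dict-counter + sorted-items max loop by "sort the letters, scan run lengths"
-- (same result: the longest run of equal letters in the sorted letter list is the highest frequency).

-- ===== PORT A =====
def nejpismeno (text : String) : Int :=
  let dictionary : PySem.Dict Char Int :=
    text.toList.foldl (fun d i =>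
      if PySem.Chars.isalpha i then
        -- 'if i not in dictionary: dictionary[i] = 0' then 'dictionary[i] += 1'
        -- (after the branch the key is present, so d[i] is d.getD i 0 — exact, no KeyError)
        let d' := if d.contains i then d else d.insert i 0
        d'.insert i (d'.getD i 0 + 1)
      else d) PySem.Dict.empty
  -- 'for i in dictionary: pass' does nothing
  let serazene := PySem.List.sorted2 dictionary.items (·.1) (·.2) false  -- sorted(items): tuple-lex order
  let highest := serazene.foldl (fun highest kv => if kv.2 > highest then kv.2 else highest) (0 : Int)
  highest * -1

-- ===== PORT B =====
def nejpismeno_alt (text : String) : Int :=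
  let letters := PySem.List.sorted (text.toList.filter PySem.Chars.isalpha) (fun c => c) false
  let st := letters.foldl (fun s c =>
      let run : Int := if some c == s.2.2 then s.2.1 + 1 else 1
      let best : Int := if run > s.1 then run else s.1
      (best, run, some c)) ((0 : Int), (0 : Int), (none : Option Char))
  Neg.neg st.1

-- ===== PRECONDITION & SPEC =====
def Spec_nejpismeno (text : String) (out : Int) : Prop := out = nejpismeno_alt text
instance (text : String) (out : Int) : Decidable (Spec_nejpismeno text out) := by unfold Spec_nejpismeno; infer_instance

-- ===== CLAIM (what is proved, stated in full; the proofs are below) =====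
def Claim_equal_nejpismeno : Prop := ∀ (text : String), Dom_nejpismeno text → Spec_nejpismeno text (nejpismeno text)

-- ===== LEMMAS AND PROOFS =====

-- the common value: the maximal multiplicity of a character of l (0 for l = [])
def maxCount (l : List Char) : Int :=
  l.toFinset.fold max 0 (fun c => (l.count c : Int))

-- B's loop body, named for the proofs (definitionally the lambda in nejpismeno_alt)
def bstep (s : Int × Int × Option Char) (c : Char) : Int × Int × Option Char :=
  let run : Int := if some c == s.2.2 then s.2.1 + 1 else 1
  let best : Int := if run > s.1 then run else s.1
  (best, run, some c)

lemma fold_max_init (S : Finset Char) (g : Char → Int) (a b : Int) :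
    S.fold max (max b a) g = max a (S.fold max b g) := by
  induction S using Finset.induction_on with
  | empty => simp [Finset.fold_empty, max_comm]
  | insert x s hx ih =>
      rw [Finset.fold_insert hx, Finset.fold_insert hx, ih, max_left_comm]

lemma le_fold_max (S : Finset Char) (g : Char → Int) (b : Int) {c : Char} (h : c ∈ S) :
    g c ≤ S.fold max b g := by
  induction S using Finset.induction_on with
  | empty => simp at h
  | insert x s hx ih =>
      rw [Finset.fold_insert hx]
      rcases Finset.mem_insert.mp h with rfl | hc
      · exact le_max_left _ _
      · exact le_trans (ih hc) (le_max_right _ _)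

lemma foldl_max_map_nodup (xs : List Char) (f : Char → Int) (b : Int) (h : xs.Nodup) :
    (xs.map f).foldl max b = xs.toFinset.fold max b f := by
  induction xs generalizing b with
  | nil => simp
  | cons x t ih =>
      rcases List.nodup_cons.mp h with ⟨hx, ht⟩
      have hx' : x ∉ t.toFinset := by simpa using hx
      rw [List.map_cons, List.foldl_cons, max_comm b (f x), List.foldl_assoc, ih _ ht,
        List.toFinset_cons, Finset.fold_insert hx']

-- ----- A-side -----

-- A's loop body, named for the proofs (definitionally the lambda in nejpismeno)
def astep (d : PySem.Dict Char Int) (i : Char) : PySem.Dict Char Int :=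
  if PySem.Chars.isalpha i then
    let d' := if d.contains i then d else d.insert i 0
    d'.insert i (d'.getD i 0 + 1)
  else d

lemma A_eq (text : String) :
    nejpismeno text = -maxCount (text.toList.filter PySem.Chars.isalpha) := by
  have h0 : nejpismeno text =
      (PySem.List.sorted2 (text.toList.foldl astep PySem.Dict.empty).items (·.1) (·.2)
        false).foldl (fun highest kv => if kv.2 > highest then kv.2 else highest) 0 * -1 := rfl
  rw [h0]
  set l := text.toList.filter PySem.Chars.isalpha with hl
  -- the counting loop is the Counter loop
  have hd : text.toList.foldl astep PySem.Dict.empty = PySem.Dict.counter l := by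
    refine (PySem.List.foldl_congr_mem text.toList astep
      (fun d i => if PySem.Chars.isalpha i then d.insert i (d.getD i 0 + 1) else d)
      PySem.Dict.empty ?_).trans ?_
    · intro d i _
      unfold astep
      by_cases hi : PySem.Chars.isalpha i
      · simp only [hi, if_true]
        by_cases hc : d.contains i
        · simp [hc]
        · simp only [hc, if_false, Bool.false_eq_true]
          rw [PySem.Dict.getD_insert_self, PySem.Dict.insert_insert_self,
            PySem.Dict.getD_of_not_contains d 0 (by simpa using hc)]
      · simp [hi]
    · rw [PySem.List.foldl_if_eq_foldl_filter, ← hl]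
      exact PySem.Dict.foldl_insert_getD_add_one_eq_counter l
  rw [hd]
  -- the running max over sorted items is the fold of max over the counts
  have hperm : (PySem.List.sorted2 (PySem.Dict.counter l).items (·.1) (·.2) false).Perm
      (PySem.Dict.counter l).items := PySem.List.sorted2_perm _ _ _ _
  have hmaxif : ∀ (s : List (Char × Int)),
      s.foldl (fun highest kv => if kv.2 > highest then kv.2 else highest) 0
      = s.foldl (fun highest kv => max highest kv.2) 0 := by
    intro s
    apply PySem.List.foldl_congr_mem
    intro acc kv _
    by_cases h : kv.2 > acc
    · simp [h, max_eq_right (le_of_lt h)]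
    · simp [h, max_eq_left (not_lt.mp h)]
  rw [hmaxif]
  have hrc : @List.foldl Int (Char × Int) (fun highest kv => max highest kv.2)
      0 (PySem.List.sorted2 (PySem.Dict.counter l).items (·.1) (·.2) false)
      = List.foldl (fun highest kv => max highest kv.2) 0 (PySem.Dict.counter l).items :=
    @List.Perm.foldl_eq _ _ _ _ _
      ⟨fun b a a' => max_right_comm b a.2 a'.2⟩ hperm 0
  rw [hrc, PySem.Dict.items_counter, List.foldl_map]
  have hmm : List.foldl (fun (x : Int) (y : Char) => max x ((l.count y : Int))) 0
        (PySem.Set.ofList l)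
      = ((PySem.Set.ofList l).map (fun y => (l.count y : Int))).foldl max 0 := by
    rw [List.foldl_map]
  rw [hmm, foldl_max_map_nodup _ _ _ (PySem.Set.nodup_ofList l)]
  have hfs : (PySem.Set.ofList l : List Char).toFinset = l.toFinset := by
    apply Finset.ext
    intro a
    simp [List.mem_toFinset, PySem.Set.mem_ofList]
  rw [hfs]
  unfold maxCount
  ring

-- ----- B-side -----

lemma keyStep (t : List Char) (c : Char) (b r : Int) :
    t.toFinset.fold max (max b (r + 1)) (fun d => (t.count d : Int) + if d = c then r + 1 else 0)
    = (insert c t.toFinset).fold max b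
        (fun d => ((c :: t).count d : Int) + if d = c then r else 0) := by
  by_cases hc : c ∈ t
  · have hmem : c ∈ t.toFinset := List.mem_toFinset.mpr hc
    rw [Finset.insert_eq_self.mpr hmem]
    have h2 : t.toFinset.fold max b (fun d => ((c :: t).count d : Int) + if d = c then r else 0)
        = t.toFinset.fold max b (fun d => (t.count d : Int) + if d = c then r + 1 else 0) := by
      apply Finset.fold_congr
      intro x _
      by_cases hxc : x = c
      · subst hxc; simp; ring
      · simp [List.count_cons, hxc]
        exact fun h => hxc h.symm
    rw [h2, fold_max_init]
    have hself := le_fold_max t.toFinset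
      (fun d => (t.count d : Int) + if d = c then r + 1 else 0) b hmem
    have hself' : (t.count c : Int) + (r + 1) ≤ t.toFinset.fold max b
        (fun d => (t.count d : Int) + if d = c then r + 1 else 0) := by simpa using hself
    exact max_eq_right (by omega)
  · have hcf : c ∉ t.toFinset := fun h => hc (List.mem_toFinset.mp h)
    rw [Finset.fold_insert hcf]
    have hcc : ((c :: t).count c : Int) + (if c = c then r else 0) = r + 1 := by
      have h0 : t.count c = 0 := List.count_eq_zero_of_not_mem hc
      simp [h0]; ring
    have h2 : t.toFinset.fold max b (fun d => ((c :: t).count d : Int) + if d = c then r else 0)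
        = t.toFinset.fold max b (fun d => (t.count d : Int)) := by
      apply Finset.fold_congr
      intro x hx
      have hxc : x ≠ c := fun h => hcf (h ▸ hx)
      simp [List.count_cons, hxc]
      exact fun h => hxc h.symm
    have h3 : t.toFinset.fold max (max b (r + 1))
          (fun d => (t.count d : Int) + if d = c then r + 1 else 0)
        = t.toFinset.fold max (max b (r + 1)) (fun d => (t.count d : Int)) := by
      apply Finset.fold_congr
      intro x hx
      have hxc : x ≠ c := fun h => hcf (h ▸ hx)
      simp [hxc]
    rw [h3, h2, fold_max_init, hcc]

lemma mainScan : ∀ (t : List Char), t.Pairwise (· ≤ ·) → ∀ (p : Char) (r b : Int), 0 ≤ r →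
    (∀ x ∈ t, p ≤ x) →
    (t.foldl bstep (b, r, some p)).1
      = t.toFinset.fold max b (fun d => (t.count d : Int) + if d = p then r else 0) := by
  intro t
  induction t with
  | nil => intro _ p r b _ _; simp
  | cons c t ih =>
      intro hsorted p r b hr hple
      have hct : ∀ x ∈ t, c ≤ x := fun x hx => (List.pairwise_cons.mp hsorted).1 x hx
      have ht : t.Pairwise (· ≤ ·) := (List.pairwise_cons.mp hsorted).2
      have hpc : p ≤ c := hple c (List.mem_cons_self ..)
      by_cases hcp : c = p
      · subst hcp
        have hstep : bstep (b, r, some c) c = (max b (r + 1), r + 1, some c) := by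
          simp only [bstep]
          by_cases h : r + 1 > b
          · simp [h, max_eq_right (le_of_lt h)]
          · simp [h, max_eq_left (not_lt.mp h)]
        rw [List.foldl_cons, hstep, ih ht c (r + 1) (max b (r + 1)) (by omega) hct,
          keyStep t c b r, List.toFinset_cons]
      · have hpnotin : p ∉ t := by
          intro hmem
          exact hcp (le_antisymm (hct p hmem) hpc)
        have hstep : bstep (b, r, some p) c = (max b 1, 1, some c) := by
          simp only [bstep]
          have : (some c == some p) = false := by
            simp [hcp]
          by_cases h : (1 : Int) > b
          · simp [this, h, max_eq_right (le_of_lt h)]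
          · simp [this, h, max_eq_left (not_lt.mp h)]
        rw [List.foldl_cons, hstep, ih ht c 1 (max b 1) (by omega) hct]
        have hk := keyStep t c b 0
        norm_num at hk
        rw [hk, List.toFinset_cons]
        have h4 : (insert c t.toFinset).fold max b
              (fun d => ((c :: t).count d : Int) + if d = p then r else 0)
            = (insert c t.toFinset).fold max b (fun d => ((c :: t).count d : Int)) := by
          apply Finset.fold_congr
          intro x hx
          have hxp : x ≠ p := by
            intro h; subst h
            rcases Finset.mem_insert.mp hx with h | h
            · exact hcp h.symm
            · exact hpnotin (List.mem_toFinset.mp h)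
          simp [hxp]
        rw [h4, Finset.fold_insert_idem]
        simp [List.count_cons]

lemma scan_eq_maxCount (s : List Char) (hs : s.Pairwise (· ≤ ·)) :
    (s.foldl bstep ((0 : Int), (0 : Int), (none : Option Char))).1 = maxCount s := by
  cases s with
  | nil => simp [maxCount]
  | cons c t =>
      have hct : ∀ x ∈ t, c ≤ x := fun x hx => (List.pairwise_cons.mp hs).1 x hx
      have ht : t.Pairwise (· ≤ ·) := (List.pairwise_cons.mp hs).2
      have hstep : bstep (0, 0, none) c = (1, 1, some c) := by
        simp [bstep]
      rw [List.foldl_cons, hstep, mainScan t ht c 1 1 (by omega) hct]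
      have hk := keyStep t c 0 0
      norm_num at hk
      rw [hk]
      unfold maxCount
      rw [List.toFinset_cons, Finset.fold_insert_idem]
      simp [List.count_cons]

lemma B_eq (text : String) :
    nejpismeno_alt text = -maxCount (text.toList.filter PySem.Chars.isalpha) := by
  have h0 : nejpismeno_alt text =
      Neg.neg ((PySem.List.sorted (text.toList.filter PySem.Chars.isalpha) (fun c => c)
        false).foldl bstep ((0 : Int), (0 : Int), (none : Option Char))).1 := rfl
  rw [h0]
  set l := text.toList.filter PySem.Chars.isalpha with hl
  set s := PySem.List.sorted l (fun c => c) false with hsdef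
  have hperm : s.Perm l := PySem.List.sorted_perm l (fun c => c) false
  have hsorted : s.Pairwise (· ≤ ·) := PySem.List.sorted_pairwise l (fun c => c)
  rw [scan_eq_maxCount s hsorted]
  have hmc : maxCount s = maxCount l := by
    unfold maxCount
    have hfs : s.toFinset = l.toFinset := by
      apply Finset.ext; intro a
      simp [List.mem_toFinset, hperm.mem_iff]
    rw [hfs]
    apply Finset.fold_congr
    intro x _
    rw [hperm.count_eq]
  rw [hmc]

-- ===== VERDICT (by name: the statement is the Claim_ definition above) =====
theorem nejpismeno_spec : Claim_equal_nejpismeno := by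
  intro text _
  show nejpismeno text = nejpismeno_alt text
  rw [A_eq, B_eq]
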